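-- pv_equiv track=rewrite | github.com/ZixiangZhouSCAU/scau-gis | 1-专业课程资料/卫星导航定位原理与应用/卫星作业/gnss-satellite-coordinate-calculator-main/app/gui_gnss.py | split_header_body
-- ===== SOURCE A (Python) =====
-- def split_header_body(lines: list[str]):
--     header, body = [], []
--     end = False
--     for ln in lines:
--         (header if not end else body).append(ln)
--         if not end and 'END OF HEADER' in ln:
--             end = True
--     return header, body
-- ===== SOURCE B (Python) =====
-- def split_header_body(lines: list[str]):
--     for i, ln in enumerate(lines):
--         if 'END OF HEADER' in ln:
--             return lines[:i + 1], lines[i + 1:]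
--     return lines[:], []
-- ===== Notes on version B (the rewrite author's own statement) =====
-- stated objective: simpler
-- what changed: B locates the index of the first 'END OF HEADER' line and returns two slices, instead of A's single pass appending each line to one of two accumulators under a boolean flag.
import Mathlib
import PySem

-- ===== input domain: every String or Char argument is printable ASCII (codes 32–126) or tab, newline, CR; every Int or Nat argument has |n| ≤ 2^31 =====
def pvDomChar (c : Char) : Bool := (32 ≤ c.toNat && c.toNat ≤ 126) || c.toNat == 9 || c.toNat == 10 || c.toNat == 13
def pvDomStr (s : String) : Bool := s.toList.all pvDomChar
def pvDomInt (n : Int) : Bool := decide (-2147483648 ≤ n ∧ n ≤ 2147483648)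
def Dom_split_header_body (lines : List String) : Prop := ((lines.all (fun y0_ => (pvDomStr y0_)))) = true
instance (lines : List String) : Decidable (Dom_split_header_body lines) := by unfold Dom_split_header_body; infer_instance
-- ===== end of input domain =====

-- B splits by locating the index of the first 'END OF HEADER' line and slicing, instead of
-- A's one pass appending each line to one of two accumulators under a boolean flag (simpler).

-- ===== PORT A =====
-- one fold step of A's loop: append ln to header or body, then possibly set the flag
def pvStepA (s : List String × List String × Bool) (ln : String) :
    List String × List String × Bool :=
  let s' : List String × List String × Bool :=
    if s.2.2 then (s.1, s.2.1 ++ [ln], s.2.2) else (s.1 ++ [ln], s.2.1, s.2.2)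
  if !s'.2.2 && PySem.Str.isIn "END OF HEADER" ln then (s'.1, s'.2.1, true) else s'

def split_header_body (lines : List String) : List String × List String :=
  let st := lines.foldl pvStepA ([], [], false)
  (st.1, st.2.1)

-- ===== PORT B =====
-- index of the first line containing 'END OF HEADER' (B's enumerate loop)
def pvFindEOH : List String → Nat → Option Nat
  | [], _ => none
  | ln :: rest, i =>
      if PySem.Str.isIn "END OF HEADER" ln then some i else pvFindEOH rest (i + 1)

def split_header_body_alt (lines : List String) : List String × List String :=
  match pvFindEOH lines 0 with
  | some i => (lines.take (i + 1), lines.drop (i + 1))   -- lines[:i+1], lines[i+1:]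
  | none => (lines, [])                                   -- lines[:], []

-- ===== PRECONDITION & SPEC =====
def Spec_split_header_body (lines : List String) (out : List String × List String) : Prop := out = split_header_body_alt lines
instance (lines : List String) (out : List String × List String) : Decidable (Spec_split_header_body lines out) := by unfold Spec_split_header_body; infer_instance

-- ===== CLAIM (what is proved, stated in full; the proofs are below) =====
def Claim_equal_split_header_body : Prop := ∀ (lines : List String), Dom_split_header_body lines → Spec_split_header_body lines (split_header_body lines)

-- ===== LEMMAS AND PROOFS =====

-- once the flag is true, A's loop just appends everything to body
lemma pv_foldl_true (ls : List String) (h b : List String) :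
    ls.foldl pvStepA (h, b, true) = (h, b ++ ls, true) := by
  induction ls generalizing b with
  | nil => simp
  | cons x xs ih =>
      simp only [List.foldl_cons, pvStepA]
      simp [ih]

lemma pv_findEOH_shift (ls : List String) (i : Nat) :
    pvFindEOH ls (i + 1) = Option.map (· + 1) (pvFindEOH ls i) := by
  induction ls generalizing i with
  | nil => simp [pvFindEOH]
  | cons x xs ih =>
      simp only [pvFindEOH]
      split_ifs with hx
      · simp
      · exact ih (i + 1)

lemma pv_main (ls : List String) (h b : List String) :
    ((ls.foldl pvStepA (h, b, false)).1, (ls.foldl pvStepA (h, b, false)).2.1) =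
      (match pvFindEOH ls 0 with
       | some i => (h ++ ls.take (i + 1), b ++ ls.drop (i + 1))
       | none => (h ++ ls, b)) := by
  induction ls generalizing h b with
  | nil => simp [pvFindEOH]
  | cons x xs ih =>
      by_cases hx : PySem.Str.isIn "END OF HEADER" x
      · simp only [List.foldl_cons, pvStepA, pvFindEOH, hx]
        simp [pv_foldl_true]
      · simp only [List.foldl_cons, pvStepA, pvFindEOH, hx]
        simp only [Bool.not_false, if_neg, Bool.false_eq_true, not_false_iff]
        have := ih (h ++ [x]) b
        simp only at this ⊢
        rw [pv_findEOH_shift]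
        cases hf : pvFindEOH xs 0 with
        | none => simpa [hf] using this
        | some j =>
            simp only [hf, Option.map_some] at this ⊢
            simpa [List.take_succ_cons, List.drop_succ_cons] using this

-- ===== VERDICT (by name: the statement is the Claim_ definition above) =====
theorem split_header_body_spec : Claim_equal_split_header_body := by
  intro lines _
  unfold Spec_split_header_body split_header_body split_header_body_alt
  have := pv_main lines [] []
  cases hf : pvFindEOH lines 0 <;> simp [hf] at this ⊢ <;> simp [this]
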